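-- pv_equiv track=rewrite | github.com/dmwm/WMCore | src/python/PSetTweaks/PSetTweak.py | setattrCalls
-- ===== SOURCE A (Python) =====
-- from builtins import object, map, range
--
-- def setattrCalls(psetPath):
--     """
--     _setattrCalls_
--
--     Generate setattr call for each parameter in the pset structure
--     Used for generating python format
--
--     """
--     result = {}
--     current = None
--     last = None
--     psets = psetPath.split(".")
--     for _ in range(0, len(psets)):
--         pset = psets.pop(0)
--         last = current
--         if current == None:
--             current = pset
--         else:
--             current += ".%s" % pset
--         if last != None:
--             result[current] = "setattr(%s, \"%s\", PSetHolder(\"%s\"))" % (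
--                 last, pset, pset)
--     return result
-- ===== SOURCE B (Python) =====
-- def _prefixes(parts):
--     """Cumulative dotted prefixes of parts, built recursively."""
--     if not parts:
--         return []
--     return [parts[0]] + [parts[0] + "." + p for p in _prefixes(parts[1:])]
--
--
-- def setattrCalls(psetPath):
--     """
--     _setattrCalls_
--
--     Generate setattr call for each parameter in the pset structure
--     Used for generating python format
--
--     """
--     psets = psetPath.split(".")
--     prefixes = _prefixes(psets)
--     return {cur: "setattr(%s, \"%s\", PSetHolder(\"%s\"))" % (parent, child, child)
--             for parent, (cur, child) in zip(prefixes, zip(prefixes[1:], psets[1:]))}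
-- ===== Notes on version B (the rewrite author's own statement) =====
-- stated objective: alternative
-- what changed: Replaces A's single loop with mutable current/last accumulators and a None-sentinel skip by a recursive cumulative-prefix list plus one zip pass pairing adjacent prefixes with path components.
import Mathlib
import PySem

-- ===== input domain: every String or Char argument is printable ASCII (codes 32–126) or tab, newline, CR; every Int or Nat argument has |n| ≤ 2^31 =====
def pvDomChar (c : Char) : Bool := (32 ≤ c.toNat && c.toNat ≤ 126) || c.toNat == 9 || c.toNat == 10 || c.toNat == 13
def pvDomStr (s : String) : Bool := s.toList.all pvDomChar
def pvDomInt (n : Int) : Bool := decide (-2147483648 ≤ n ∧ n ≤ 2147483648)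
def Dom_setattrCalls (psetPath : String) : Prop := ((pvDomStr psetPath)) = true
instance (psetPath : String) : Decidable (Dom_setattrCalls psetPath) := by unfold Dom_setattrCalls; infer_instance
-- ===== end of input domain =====

-- B replaces A's mutable current/last accumulators and None-sentinel skip by a recursively built
-- cumulative-prefix list paired with the components via zip; objective: alternative decomposition.

-- ===== PORT A =====
-- the '%s' format applied in A's loop body
def pvFmt (last pset : String) : String :=
  "setattr(" ++ last ++ ", \"" ++ pset ++ "\", PSetHolder(\"" ++ pset ++ "\"))"

-- A's for-loop: popping psets one by one, carrying (result, current); 'last' is the previous current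
def aLoop : List String → PySem.Dict String String → Option String → PySem.Dict String String
  | [], result, _ => result
  | pset :: rest, result, current =>
    let last := current
    let current' := match current with
      | none => pset
      | some c => c ++ "." ++ pset
    let result' := match last with
      | none => result
      | some l => result.insert current' (pvFmt l pset)
    aLoop rest result' (some current')

def setattrCalls (psetPath : String) : List (String × String) :=
  -- psetPath.split(".") : the separator "." is non-empty, so split? is always 'some'
  (aLoop ((PySem.Str.split? psetPath ".").getD []) PySem.Dict.empty none).items

-- ===== PORT B =====
-- Source B's _prefixes: recursive cumulative dotted prefixes
def bPrefixes : List String → List String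
  | [] => []
  | h :: t => h :: (bPrefixes t).map (fun p => h ++ "." ++ p)

def setattrCalls_alt (psetPath : String) : List (String × String) :=
  let psets := (PySem.Str.split? psetPath ".").getD []
  let prefixes := bPrefixes psets
  -- zip(prefixes, zip(prefixes[1:], psets[1:])) feeding the dict comprehension
  let triples := prefixes.zip ((PySem.List.slice prefixes (some 1) none).zip
                               (PySem.List.slice psets (some 1) none))
  (triples.foldl (fun d tr => d.insert tr.2.1 (pvFmt tr.1 tr.2.2)) PySem.Dict.empty).items

-- ===== PRECONDITION & SPEC =====
def Spec_setattrCalls (psetPath : String) (out : List (String × String)) : Prop := out = setattrCalls_alt psetPath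
instance (psetPath : String) (out : List (String × String)) : Decidable (Spec_setattrCalls psetPath out) := by unfold Spec_setattrCalls; infer_instance

-- ===== CLAIM (what is proved, stated in full; the proofs are below) =====
def Claim_equal_setattrCalls : Prop := ∀ (psetPath : String), Dom_setattrCalls psetPath → Spec_setattrCalls psetPath (setattrCalls psetPath)

-- ===== LEMMAS AND PROOFS =====

-- the common characterisation: the (key, value) items both ports produce, given the first
-- component cur and the remaining components
def pairs : String → List String → List (String × String)
  | _, [] => []
  | cur, q :: t => (cur ++ "." ++ q, pvFmt cur q) :: pairs (cur ++ "." ++ q) t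

lemma length_dot_append (a b : String) :
    (a ++ "." ++ b).toList.length = a.toList.length + 1 + b.toList.length := by
  simp; omega

lemma pairs_key_long : ∀ (t : List String) (cur : String), ∀ p ∈ pairs cur t,
    cur.toList.length < p.1.toList.length := by
  intro t
  induction t with
  | nil => intro cur p hp; simp [pairs] at hp
  | cons q t ih =>
    intro cur p hp
    simp only [pairs, List.mem_cons] at hp
    rcases hp with h | h
    · subst h; rw [length_dot_append]; omega
    · have := ih (cur ++ "." ++ q) p h
      have h2 := length_dot_append cur q
      omega

lemma pairs_keys_nodup : ∀ (t : List String) (cur : String),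
    ((pairs cur t).map (·.1)).Nodup := by
  intro t
  induction t with
  | nil => intro cur; simp [pairs]
  | cons q t ih =>
    intro cur
    simp only [pairs, List.map_cons, List.nodup_cons]
    refine ⟨?_, ih _⟩
    intro hmem
    rcases List.mem_map.mp hmem with ⟨p, hp, hkey⟩
    have := pairs_key_long t (cur ++ "." ++ q) p hp
    rw [hkey] at this
    omega

-- A's loop, started after the first component, appends exactly 'pairs'
lemma aLoop_items : ∀ (t : List String) (d : PySem.Dict String String) (cur : String),
    (∀ p ∈ d.items, p.1.toList.length ≤ cur.toList.length) →
    (aLoop t d (some cur)).items = d.items ++ pairs cur t := by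
  intro t
  induction t with
  | nil => intro d cur _; simp [aLoop, pairs]
  | cons q t ih =>
    intro d cur hinv
    have hfresh : d.contains (cur ++ "." ++ q) = false := by
      by_contra hc
      have hc' : d.contains (cur ++ "." ++ q) = true := by
        cases h : d.contains (cur ++ "." ++ q) <;> simp_all
      have hk := (PySem.Dict.contains_iff_mem_keys _ _).mp hc'
      simp only [PySem.Dict.keys, List.mem_map] at hk
      rcases hk with ⟨p, hp, hkey⟩
      have := hinv p hp
      rw [hkey] at this
      have h2 := length_dot_append cur q
      omega
    show (aLoop t (d.insert (cur ++ "." ++ q) (pvFmt cur q)) (some (cur ++ "." ++ q))).items = _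
    rw [ih (d.insert (cur ++ "." ++ q) (pvFmt cur q)) (cur ++ "." ++ q) ?_]
    · rw [PySem.Dict.items_insert_of_not_contains d _ hfresh]
      simp [pairs]
    · intro p hp
      rw [PySem.Dict.items_insert_of_not_contains d _ hfresh] at hp
      rcases List.mem_append.mp hp with h | h
      · have := hinv p h
        have h2 := length_dot_append cur q
        omega
      · simp only [List.mem_singleton] at h
        subst h
        exact Nat.le_refl _

-- scan form of bPrefixes with an accumulated prefix, used to unroll the zip
def scanP (cur : String) : List String → List String
  | [] => [cur]
  | q :: t => cur :: scanP (cur ++ "." ++ q) t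

lemma map_prepend_scanP : ∀ (t : List String) (cur h : String),
    (scanP cur t).map (fun s => h ++ "." ++ s) = scanP (h ++ "." ++ cur) t := by
  intro t
  induction t with
  | nil => intro cur h; simp [scanP]
  | cons q t ih =>
    intro cur h
    simp only [scanP, List.map_cons, ih]
    have : h ++ "." ++ cur ++ "." ++ q = h ++ "." ++ (cur ++ "." ++ q) := by
      simp [String.append_assoc]
    rw [this]

lemma bPrefixes_cons_eq_scanP : ∀ (t : List String) (h : String),
    bPrefixes (h :: t) = scanP h t := by
  intro t
  induction t with
  | nil => intro h; simp [bPrefixes, scanP]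
  | cons q t ih =>
    intro h
    show h :: (bPrefixes (q :: t)).map (fun p => h ++ "." ++ p) = h :: scanP (h ++ "." ++ q) t
    rw [ih, map_prepend_scanP]

lemma scanP_head : ∀ (t : List String) (cur : String), ∃ rest, scanP cur t = cur :: rest := by
  intro t cur; cases t <;> exact ⟨_, rfl⟩

lemma zip_scanP_eq_pairs : ∀ (t : List String) (cur : String),
    ((scanP cur t).zip ((scanP cur t).tail.zip t)).map
        (fun tr => (tr.2.1, pvFmt tr.1 tr.2.2)) = pairs cur t := by
  intro t
  induction t with
  | nil => intro cur; simp [scanP, pairs]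
  | cons q t ih =>
    intro cur
    obtain ⟨rest, hrest⟩ := scanP_head t (cur ++ "." ++ q)
    have ih' := ih (cur ++ "." ++ q)
    rw [hrest] at ih'
    simp only [List.tail_cons] at ih'
    show List.map _ ((cur :: scanP (cur ++ "." ++ q) t).zip
          ((cur :: scanP (cur ++ "." ++ q) t).tail.zip (q :: t))) = _
    rw [hrest]
    simp only [List.tail_cons, List.zip_cons_cons, List.map_cons]
    simp only [pairs]
    rw [← ih']

lemma contains_empty_false (k : String) :
    (PySem.Dict.empty : PySem.Dict String String).contains k = false := by
  cases h : (PySem.Dict.empty : PySem.Dict String String).contains k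
  · rfl
  · have := (PySem.Dict.contains_iff_mem_keys _ _).mp h
    simp [PySem.Dict.empty, PySem.Dict.keys] at this

-- the two ports agree for an arbitrary component list
lemma core_eq (psets : List String) :
    (aLoop psets PySem.Dict.empty none).items =
    (((bPrefixes psets).zip ((PySem.List.slice (bPrefixes psets) (some 1) none).zip
        (PySem.List.slice psets (some 1) none))).foldl
      (fun d tr => d.insert tr.2.1 (pvFmt tr.1 tr.2.2)) PySem.Dict.empty).items := by
  cases psets with
  | nil => simp [aLoop, bPrefixes, PySem.List.slice_from_one, PySem.Dict.empty]
  | cons h t =>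
    rw [PySem.List.slice_from_one, PySem.List.slice_from_one]
    have hA : (aLoop (h :: t) PySem.Dict.empty none).items = pairs h t := by
      show (aLoop t PySem.Dict.empty (some h)).items = pairs h t
      rw [aLoop_items t PySem.Dict.empty h (by simp [PySem.Dict.empty])]
      simp [PySem.Dict.empty]
    have hkeys := pairs_keys_nodup t h
    rw [← zip_scanP_eq_pairs t h] at hkeys
    have hmapk : ∀ (l : List (String × String × String)),
        ((l.map (fun tr => (tr.2.1, pvFmt tr.1 tr.2.2))).map (·.1)) = l.map (fun tr => tr.2.1) := by
      intro l; simp [List.map_map, Function.comp]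
    rw [hmapk] at hkeys
    have hB := PySem.Dict.items_foldl_insert_fresh
      ((scanP h t).zip ((scanP h t).tail.zip t))
      (fun tr => tr.2.1) (fun tr => pvFmt tr.1 tr.2.2) PySem.Dict.empty
      (by intro a _; exact contains_empty_false _) hkeys
    rw [bPrefixes_cons_eq_scanP, List.tail_cons]
    have htail : (scanP h t).tail.zip t = ((scanP h t).tail).zip t := rfl
    rw [hA]
    rcases scanP_head t h with ⟨rest, hrest⟩
    calc pairs h t
        = ((scanP h t).zip ((scanP h t).tail.zip t)).map
            (fun tr => (tr.2.1, pvFmt tr.1 tr.2.2)) := (zip_scanP_eq_pairs t h).symm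
      _ = _ := by
            rw [hB]
            simp [PySem.Dict.empty]

-- ===== VERDICT (by name: the statement is the Claim_ definition above) =====
theorem setattrCalls_spec : Claim_equal_setattrCalls := by
  intro psetPath _
  unfold Spec_setattrCalls setattrCalls setattrCalls_alt
  exact core_eq ((PySem.Str.split? psetPath ".").getD [])
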